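-- pv_equiv track=rewrite | github.com/UrbanBobek/advent-of-code | day6/day6_1.py | numberOfWinningButtonPressDurations
-- ===== SOURCE A (Python) =====
-- def numberOfWinningButtonPressDurations(race_time, record_distance):
--     count = 0
--     for i in range(1, race_time):
--         press_duration = i
--         remaining_time = race_time - press_duration
--         traveled_distance = remaining_time*press_duration
--
--         if(traveled_distance > record_distance):
--             count+=1
--
--     return count
-- ===== SOURCE B (Python) =====
-- from math import isqrt
--
-- def numberOfWinningButtonPressDurations(race_time, record_distance):
--     # Closed form: i*(race_time-i) > record_distance <=> (2i-race_time)^2 < disc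
--     disc = race_time * race_time - 4 * record_distance
--     if disc <= 0:
--         return 0
--     s = isqrt(disc - 1)  # largest s with s*s < disc
--     lo = max(1, -((s - race_time) // 2))          # ceil((race_time - s) / 2)
--     hi = min(race_time - 1, (race_time + s) // 2)  # floor((race_time + s) / 2)
--     return max(0, hi - lo + 1)
-- ===== Notes on version B (the rewrite author's own statement) =====
-- stated objective: faster
-- what changed: Replaces the O(race_time) loop over all press durations with an O(1) closed form: solve the quadratic inequality i*(T-i) > record via integer square root and count the integers between the roots, clamped to [1, race_time-1].
import Mathlib
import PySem

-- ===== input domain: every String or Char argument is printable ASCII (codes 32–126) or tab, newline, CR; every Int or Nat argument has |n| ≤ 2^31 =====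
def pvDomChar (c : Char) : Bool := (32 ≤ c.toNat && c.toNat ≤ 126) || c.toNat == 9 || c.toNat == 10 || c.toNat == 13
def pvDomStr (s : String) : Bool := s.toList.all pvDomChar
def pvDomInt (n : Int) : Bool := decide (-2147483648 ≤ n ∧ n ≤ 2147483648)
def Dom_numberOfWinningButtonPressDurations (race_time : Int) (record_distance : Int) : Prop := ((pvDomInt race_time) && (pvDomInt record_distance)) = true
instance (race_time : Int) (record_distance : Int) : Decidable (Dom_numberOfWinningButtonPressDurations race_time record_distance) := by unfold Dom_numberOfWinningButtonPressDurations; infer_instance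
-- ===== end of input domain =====

-- B replaces A's O(race_time) loop by an O(1) closed form: count the integers
-- strictly between the roots of i*(T-i) = record via an integer square root.

-- ===== PORT A =====
def numberOfWinningButtonPressDurations (race_time : Int) (record_distance : Int) : Int :=
  (PySem.List.pyRange 1 race_time 1).foldl
    (fun count i =>
      let press_duration := i
      let remaining_time := race_time - press_duration
      let traveled_distance := remaining_time * press_duration
      if traveled_distance > record_distance then count + 1 else count)
    0

-- ===== PORT B =====
def numberOfWinningButtonPressDurations_alt (race_time : Int) (record_distance : Int) : Int :=
  let disc := race_time * race_time - 4 * record_distance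
  if disc ≤ 0 then 0
  else
    let s := Int.sqrt (disc - 1)   -- math.isqrt(disc - 1), exact: disc - 1 ≥ 0 here
    let lo := max 1 (-(PySem.Int.floordiv (s - race_time) 2))
    let hi := min (race_time - 1) (PySem.Int.floordiv (race_time + s) 2)
    max 0 (hi - lo + 1)

-- ===== PRECONDITION & SPEC =====
def Spec_numberOfWinningButtonPressDurations (race_time : Int) (record_distance : Int) (out : Int) : Prop := out = numberOfWinningButtonPressDurations_alt race_time record_distance
instance (race_time : Int) (record_distance : Int) (out : Int) : Decidable (Spec_numberOfWinningButtonPressDurations race_time record_distance out) := by unfold Spec_numberOfWinningButtonPressDurations; infer_instance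

-- ===== CLAIM (what is proved, stated in full; the proofs are below) =====
def Claim_equal_numberOfWinningButtonPressDurations : Prop := ∀ (race_time : Int) (record_distance : Int), Dom_numberOfWinningButtonPressDurations race_time record_distance → Spec_numberOfWinningButtonPressDurations race_time record_distance (numberOfWinningButtonPressDurations race_time record_distance)

-- ===== LEMMAS AND PROOFS =====

-- s := Int.sqrt (d - 1) brackets d: s*s < d ≤ (s+1)*(s+1)  (for 1 ≤ d)
theorem pv_sqrt_bracket (d : Int) (hd : 1 ≤ d) :
    Int.sqrt (d - 1) * Int.sqrt (d - 1) < d ∧ d ≤ (Int.sqrt (d - 1) + 1) * (Int.sqrt (d - 1) + 1) := by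
  have h0 : (0 : Int) ≤ d - 1 := by omega
  have h3 : ((d - 1).toNat : Int) = d - 1 := Int.toNat_of_nonneg h0
  have ha : ((d - 1).toNat.sqrt : Int) * ((d - 1).toNat.sqrt : Int) ≤ ((d - 1).toNat : Int) := by
    have h := (Nat.cast_le (α := Int)).mpr (Nat.sqrt_le' (d - 1).toNat)
    push_cast at h
    rw [pow_two] at h
    exact h
  have hb : ((d - 1).toNat : Int) < (((d - 1).toNat.sqrt : Int) + 1) * (((d - 1).toNat.sqrt : Int) + 1) := by
    have h := (Nat.cast_lt (α := Int)).mpr (Nat.lt_succ_sqrt' (d - 1).toNat)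
    push_cast at h
    rw [pow_two] at h
    exact h
  unfold Int.sqrt
  constructor
  · linarith
  · linarith

-- the winning condition is an interval in i, delimited by s
theorem pv_win_iff (T R i : Int) (hd : 0 < T * T - 4 * R) :
    ((T - i) * i > R) ↔
      (T - Int.sqrt (T * T - 4 * R - 1) ≤ 2 * i ∧ 2 * i ≤ T + Int.sqrt (T * T - 4 * R - 1)) := by
  set d := T * T - 4 * R with hdef
  set s := Int.sqrt (d - 1) with hs
  obtain ⟨hlt, hle⟩ := pv_sqrt_bracket d (by omega)
  have hs0 : 0 ≤ s := Int.sqrt_nonneg _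
  constructor
  · intro h
    -- (2i - T)^2 < d, hence |2i - T| ≤ s
    have hsq : (2 * i - T) * (2 * i - T) < d := by nlinarith
    constructor
    · by_contra hc
      push_neg at hc
      nlinarith
    · by_contra hc
      push_neg at hc
      nlinarith
  · intro ⟨h1, h2⟩
    have hsq : (2 * i - T) * (2 * i - T) ≤ s * s := by nlinarith
    nlinarith

-- counting loop = countP
theorem pv_A_eq_countP (T R : Int) :
    numberOfWinningButtonPressDurations T R =
      ((PySem.List.pyRange 1 T 1).countP (fun i => decide ((T - i) * i > R)) : Int) := by
  unfold numberOfWinningButtonPressDurations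
  simp only []
  rw [PySem.List.foldl_ite_add_one (p := fun i => (T - i) * i > R)]
  ring

-- closed-form count of {k ∈ range n : a ≤ 2(1+k) ≤ b}
theorem pv_count_interval (n : Nat) (a b : Int) :
    (((List.range n).countP (fun (k : Nat) => decide (a ≤ 2 * (1 + (k : Int)) ∧ 2 * (1 + (k : Int)) ≤ b))) : Int)
      = max 0 (min (n : Int) (b / 2) - max 1 (-((-a) / 2)) + 1) := by
  induction n with
  | zero => simp
  | succ m ih =>
    rw [List.range_succ, List.countP_append]
    by_cases h : a ≤ 2 * (1 + (m : Int)) ∧ 2 * (1 + (m : Int)) ≤ b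
    · simp only [List.countP_cons, List.countP_nil, decide_eq_true h]
      push_cast
      push_cast at ih
      omega
    · simp only [List.countP_cons, List.countP_nil, decide_eq_false h]
      push_cast
      push_cast at ih
      omega

-- ===== VERDICT (by name: the statement is the Claim_ definition above) =====
theorem numberOfWinningButtonPressDurations_spec : Claim_equal_numberOfWinningButtonPressDurations := by
  intro T R _
  show numberOfWinningButtonPressDurations T R = numberOfWinningButtonPressDurations_alt T R
  rw [pv_A_eq_countP]
  by_cases hd : T * T - 4 * R ≤ 0
  · have halt : numberOfWinningButtonPressDurations_alt T R = 0 := by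
      simp only [numberOfWinningButtonPressDurations_alt]
      rw [if_pos hd]
    rw [halt]
    have hz : (PySem.List.pyRange 1 T 1).countP (fun i => decide ((T - i) * i > R)) = 0 := by
      apply List.countP_eq_zero.mpr
      intro i hi
      simp only [decide_eq_true_eq]
      have hmem := (PySem.List.mem_pyRange_one).mp hi
      intro hgt
      nlinarith [sq_nonneg (2 * i - T)]
    rw [hz]
    simp
  · push_neg at hd
    rw [show numberOfWinningButtonPressDurations_alt T R
          = max 0 (min (T - 1) ((T + Int.sqrt (T * T - 4 * R - 1)) / 2)
              - max 1 (-((Int.sqrt (T * T - 4 * R - 1) - T) / 2)) + 1) from by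
      simp only [numberOfWinningButtonPressDurations_alt]
      rw [if_neg (by omega)]
      rw [PySem.Int.floordiv_eq_ediv_of_pos (by norm_num), PySem.Int.floordiv_eq_ediv_of_pos (by norm_num)]]
    rw [PySem.List.pyRange_one, List.countP_map]
    have hcongr : ∀ k ∈ List.range (T - 1).toNat,
        (((fun i => decide ((T - i) * i > R)) ∘ (fun k : Nat => (1 : Int) + k)) k = true)
          ↔ ((fun k : Nat => decide (T - Int.sqrt (T * T - 4 * R - 1) ≤ 2 * (1 + (k : Int))
                ∧ 2 * (1 + (k : Int)) ≤ T + Int.sqrt (T * T - 4 * R - 1))) k = true) := by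
      intro k _
      simp only [Function.comp, decide_eq_true_eq]
      exact pv_win_iff T R (1 + k) hd
    rw [List.countP_congr hcongr]
    rw [pv_count_interval]
    have hs0 : 0 ≤ Int.sqrt (T * T - 4 * R - 1) := Int.sqrt_nonneg _
    generalize Int.sqrt (T * T - 4 * R - 1) = q at hs0 ⊢
    omega
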